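-- pv_equiv track=rewrite | github.com/zhutouwangzha/linx-apd | scripts/generate_bpf_files.py | pares_enter_params
-- ===== SOURCE A (Python) =====
-- def pares_enter_params(param_str):
--     # 移除多余空格并分割参数
--     items = [item.strip() for item in param_str.split(",")]
--     params = []
--
--     # 成对处理类型和名称
--     for i in range(0, len(items), 2):
--         if i + 1 >= len(items):
--             break
--
--         ptype = items[i]
--         pname = items[i + 1]
--         params.append((ptype, pname))
--
--     return params
-- ===== SOURCE B (Python) =====
-- def pares_enter_params(param_str):
--     # Strided-slice reformulation: take the even-indexed items as types and the
--     # odd-indexed items as names; zip truncates on the shorter slice, which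
--     # reproduces the original loop's break on an odd trailing element.
--     items = [item.strip() for item in param_str.split(",")]
--     types = items[0::2]
--     names = items[1::2]
--     return list(zip(types, names))
-- ===== Notes on version B (the rewrite author's own statement) =====
-- stated objective: idiomatic
-- what changed: Replaces the explicit index loop over range(0, len, 2) with a break guard by two strided slices (items[0::2], items[1::2]) zipped together, zip's truncation handling the odd trailing element.
import Mathlib
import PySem

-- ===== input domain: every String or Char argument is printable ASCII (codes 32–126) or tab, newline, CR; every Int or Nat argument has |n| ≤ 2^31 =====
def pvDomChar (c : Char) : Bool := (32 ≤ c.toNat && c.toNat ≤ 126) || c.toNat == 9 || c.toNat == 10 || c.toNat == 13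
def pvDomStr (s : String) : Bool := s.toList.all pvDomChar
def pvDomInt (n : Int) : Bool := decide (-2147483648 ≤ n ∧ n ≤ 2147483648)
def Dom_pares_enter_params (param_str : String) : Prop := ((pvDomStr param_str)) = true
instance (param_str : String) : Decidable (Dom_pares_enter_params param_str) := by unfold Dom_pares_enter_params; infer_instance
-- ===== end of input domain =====

-- B replaces A's index loop (range(0, len, 2) with a break) by zipping the two strided
-- slices items[0::2] and items[1::2]; same result, more idiomatic decomposition.

-- ===== PORT A =====
-- the 'for i in range(0, len(items), 2): if i+1 >= len(items): break; …' loop;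
-- items[i] is in range whenever read, so pyGetD's default is never used
def pairLoop (items : List String) : List Int → List (String × String) → List (String × String)
  | [], params => params
  | i :: rest, params =>
    if i + 1 ≥ (items.length : Int) then params
    else pairLoop items rest
      (params ++ [(PySem.List.pyGetD items i "", PySem.List.pyGetD items (i + 1) "")])

def pares_enter_params (param_str : String) : List (String × String) :=
  -- param_str.split(",") with a nonempty separator always succeeds, so .getD [] is exact
  let items := ((PySem.Str.split? param_str ",").getD []).map PySem.Str.strip
  pairLoop items (PySem.List.pyRange 0 (items.length : Int) 2) []

-- ===== PORT B =====
def pares_enter_params_alt (param_str : String) : List (String × String) :=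
  let items := ((PySem.Str.split? param_str ",").getD []).map PySem.Str.strip
  -- items[0::2] / items[1::2]: step 2 ≠ 0, so slice? always succeeds and .getD [] is exact
  let types := (PySem.List.slice? items (some 0) none 2).getD []
  let names := (PySem.List.slice? items (some 1) none 2).getD []
  types.zip names

-- ===== PRECONDITION & SPEC =====
def Spec_pares_enter_params (param_str : String) (out : List (String × String)) : Prop := out = pares_enter_params_alt param_str
instance (param_str : String) (out : List (String × String)) : Decidable (Spec_pares_enter_params param_str out) := by unfold Spec_pares_enter_params; infer_instance

-- ===== CLAIM (what is proved, stated in full; the proofs are below) =====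
def Claim_equal_pares_enter_params : Prop := ∀ (param_str : String), Dom_pares_enter_params param_str → Spec_pares_enter_params param_str (pares_enter_params param_str)

-- ===== LEMMAS AND PROOFS =====

-- the common value both programs compute from the stripped item list
def pairUp {α : Type} : List α → List (α × α)
  | [] => []
  | [_] => []
  | x :: y :: r => (x, y) :: pairUp r

-- every second element starting at index 0
def everyOther {α : Type} : List α → List α
  | [] => []
  | [x] => [x]
  | x :: _ :: r => x :: everyOther r

lemma everyOther_cons {α : Type} (y : α) (r : List α) :
    everyOther (y :: r) = y :: everyOther r.tail := by
  cases r <;> simp [everyOther]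

lemma pyRange_two_nil (a b : Int) (h : b ≤ a) : PySem.List.pyRange a b 2 = [] := by
  rw [PySem.List.pyRange_of_pos a b (by norm_num)]
  simp [show ¬ a < b by omega]

lemma pyRange_two_cons (a b : Int) (h : a < b) :
    PySem.List.pyRange a b 2 = a :: PySem.List.pyRange (a + 2) b 2 := by
  rw [PySem.List.pyRange_of_pos a b (by norm_num),
      PySem.List.pyRange_of_pos (a + 2) b (by norm_num)]
  have hc : (if a < b then ((b - a + 2 - 1) / 2).toNat else 0)
      = (if a + 2 < b then ((b - (a + 2) + 2 - 1) / 2).toNat else 0) + 1 := by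
    split_ifs <;> omega
  rw [hc, List.range_succ_eq_map]
  simp [List.map_map, Function.comp_def]
  intro k _
  ring

lemma pairLoop_eq (l : List String) (k : Nat) (acc : List (String × String)) :
    pairLoop l (PySem.List.pyRange (k : Int) (l.length : Int) 2) acc
      = acc ++ pairUp (l.drop k) := by
  by_cases h : l.length ≤ k
  · rw [pyRange_two_nil _ _ (by exact_mod_cast h)]
    simp [pairLoop, List.drop_of_length_le h, pairUp]
  · have h' : k < l.length := by omega
    rw [pyRange_two_cons _ _ (by exact_mod_cast h')]
    by_cases h2 : l.length ≤ k + 1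
    · simp only [pairLoop, if_pos (by exact_mod_cast h2 : (k : Int) + 1 ≥ (l.length : Int))]
      have hd : l.drop k = [l[k]] := by
        rw [List.drop_eq_getElem_cons h', List.drop_of_length_le h2]
      simp [hd, pairUp]
    · have h2' : k + 1 < l.length := by omega
      have hcond : ¬ ((k : Int) + 1 ≥ (l.length : Int)) := by exact_mod_cast not_le.mpr h2'
      simp only [pairLoop, if_neg hcond]
      have hcast : (k : Int) + 2 = ((k + 2 : Nat) : Int) := by push_cast; ring
      rw [hcast, pairLoop_eq l (k + 2)]
      have hd : l.drop k = l[k] :: l[k + 1] :: l.drop (k + 2) := by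
        rw [List.drop_eq_getElem_cons h', List.drop_eq_getElem_cons h2']
      have hg1 : PySem.List.pyGetD l (k : Int) "" = l[k] := by
        rw [PySem.List.pyGetD_natCast]
        simp [List.getD_eq_getElem?_getD, List.getElem?_eq_getElem h']
      have hg2 : PySem.List.pyGetD l ((k : Int) + 1) "" = l[k + 1] := by
        rw [show ((k : Int) + 1) = ((k + 1 : Nat) : Int) by push_cast; ring,
          PySem.List.pyGetD_natCast]
        simp [List.getD_eq_getElem?_getD, List.getElem?_eq_getElem h2']
      rw [hd, hg1, hg2]
      simp [pairUp]
termination_by l.length - k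

lemma filterMap_range_stride {α : Type} (l : List α) :
    (List.range ((l.length + 1) / 2)).filterMap (fun k => l[2 * k]?) = everyOther l := by
  match l with
  | [] => simp [everyOther]
  | [x] => simp [everyOther, List.range_succ]
  | x :: y :: r =>
    have hc : ((x :: y :: r).length + 1) / 2 = (r.length + 1) / 2 + 1 := by
      simp; omega
    rw [hc, List.range_succ_eq_map, List.filterMap_cons, List.filterMap_map]
    have hf : (fun k => (x :: y :: r)[2 * k]?) ∘ Nat.succ = fun k => r[2 * k]? := by
      funext k
      have h2 : 2 * Nat.succ k = 2 * k + 1 + 1 := by omega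
      simp [h2]
    rw [hf, filterMap_range_stride r]
    simp [everyOther]

lemma slice?_two_zero {α : Type} (l : List α) :
    PySem.List.slice? l (some 0) none 2
      = some ((List.range ((l.length + 1) / 2)).filterMap (fun k => l[2 * k]?)) := by
  have hC : (if 0 < l.length then (((l.length : Int) + 2 - 1) / 2).toNat else 0)
      = (l.length + 1) / 2 := by
    split_ifs <;> omega
  simp only [PySem.List.slice?, PySem.List.sliceIndices]
  norm_num
  rw [hC]
  apply List.filterMap_congr
  intro k _
  congr 1

lemma slice?_two_one {α : Type} (l : List α) :
    PySem.List.slice? l (some 1) none 2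
      = some ((List.range (l.length / 2)).filterMap (fun k => l[2 * k + 1]?)) := by
  have hC : (if 1 < l.length then (((l.length : Int) - min 1 (l.length : Int) + 2 - 1) / 2).toNat else 0)
      = l.length / 2 := by
    split_ifs with hlt
    · have hm : min (1 : Int) (l.length : Int) = 1 := by omega
      rw [hm]; omega
    · omega
  simp only [PySem.List.slice?, PySem.List.sliceIndices]
  norm_num
  rw [hC]
  apply List.filterMap_congr
  intro k hk
  simp only [List.mem_range] at hk
  have hlen : 2 ≤ l.length := by omega
  congr 1
  all_goals omega

lemma slice_stride_zero {α : Type} (l : List α) :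
    (PySem.List.slice? l (some 0) none 2).getD [] = everyOther l := by
  rw [slice?_two_zero, Option.getD_some, filterMap_range_stride]

lemma slice_stride_one {α : Type} (l : List α) :
    (PySem.List.slice? l (some 1) none 2).getD [] = everyOther l.tail := by
  rw [slice?_two_one, Option.getD_some]
  rcases l with _ | ⟨x, r⟩
  · simp [everyOther]
  · simp only [List.length_cons, List.tail_cons]
    rw [← filterMap_range_stride r]
    apply List.filterMap_congr
    intro k _
    simp

lemma zip_everyOther {α : Type} (l : List α) :
    (everyOther l).zip (everyOther l.tail) = pairUp l := by
  match l with
  | [] => simp [everyOther, pairUp]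
  | [x] => simp [everyOther, pairUp]
  | x :: y :: r =>
    simp only [everyOther, List.tail_cons, everyOther_cons, List.zip_cons_cons, pairUp]
    rw [zip_everyOther r]

-- ===== VERDICT (by name: the statement is the Claim_ definition above) =====
theorem pares_enter_params_spec : Claim_equal_pares_enter_params := by
  intro param_str _
  unfold Spec_pares_enter_params pares_enter_params pares_enter_params_alt
  simp only []
  rw [slice_stride_zero, slice_stride_one, zip_everyOther]
  simpa using pairLoop_eq ((PySem.Str.split? param_str ",").getD [] |>.map PySem.Str.strip) 0 []
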